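-- pv_equiv track=rewrite | github.com/veroniica/detector-de-mentiras | audio_analysis/utils/output_formatter.py | _format_transcript_as_script
-- ===== SOURCE A (Python) =====
-- from typing import Dict, List, Any
--
-- def _format_transcript_as_script(transcript: List[Dict[str, Any]]) -> str:
--     """
--     Format transcript as a script with speakers and timestamps.
--
--     Args:
--         transcript: List of transcript segments with speaker information
--
--     Returns:
--         Formatted script as string
--     """
--     script_lines = []
--     current_speaker = None
--
--     for segment in transcript:
--         if "text" not in segment or not segment["text"]:
--             continue
--
--         speaker = segment.get("speaker", "Unknown")
--         start_timestamp = segment.get("start_timestamp", "00:00")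
--         text = segment["text"]
--
--         # Add speaker name if it changed
--         if speaker != current_speaker:
--             script_lines.append(f"\n[{start_timestamp}] {speaker}:")
--             current_speaker = speaker
--
--         # Add the text
--         script_lines.append(f"    {text}")
--
--     return "\n".join(script_lines)
-- ===== SOURCE B (Python) =====
-- def _format_transcript_as_script(transcript):
--     """Format transcript as a script: filter empty segments, then emit per
--     consecutive same-speaker run (run-grouping decomposition)."""
--     segs = [s for s in transcript if s.get("text")]
--     lines = []
--     i, n = 0, len(segs)
--     while i < n:
--         first = segs[i]
--         speaker = first.get("speaker", "Unknown")
--         j = i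
--         while j < n and segs[j].get("speaker", "Unknown") == speaker:
--             j += 1
--         lines.append(f"\n[{first.get('start_timestamp', '00:00')}] {speaker}:")
--         for s in segs[i:j]:
--             lines.append(f"    {s['text']}")
--         i = j
--     return "\n".join(lines)
-- ===== Notes on version B (the rewrite author's own statement) =====
-- stated objective: alternative
-- what changed: A is one stateful pass tracking current_speaker to decide when to emit a header; B first filters out empty-text segments, then groups the remainder into consecutive same-speaker runs (index/while scan) and emits one header plus the texts per run.
import Mathlib
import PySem

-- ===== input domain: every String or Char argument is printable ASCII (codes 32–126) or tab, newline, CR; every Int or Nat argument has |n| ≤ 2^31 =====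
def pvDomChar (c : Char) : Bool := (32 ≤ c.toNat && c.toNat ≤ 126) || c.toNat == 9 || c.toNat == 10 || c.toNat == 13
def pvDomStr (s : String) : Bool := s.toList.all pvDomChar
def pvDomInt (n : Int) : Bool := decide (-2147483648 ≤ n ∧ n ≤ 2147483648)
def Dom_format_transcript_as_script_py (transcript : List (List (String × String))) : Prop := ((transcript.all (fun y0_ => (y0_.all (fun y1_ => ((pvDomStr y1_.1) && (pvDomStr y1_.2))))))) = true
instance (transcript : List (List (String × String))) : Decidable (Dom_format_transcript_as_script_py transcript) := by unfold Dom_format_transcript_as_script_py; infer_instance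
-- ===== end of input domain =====

-- B re-decomposes A's stateful single pass as filter + consecutive same-speaker run grouping; same cost (objective: alternative).

-- shared helper: first-match association-list lookup with default (= Python dict.get(key, dflt))
def pvGet (seg : List (String × String)) (key dflt : String) : String :=
  match seg.find? (fun p => p.1 == key) with
  | some p => p.2
  | none => dflt

-- ===== PORT A =====
-- one step of A's for-loop; state = (script_lines, current_speaker)
def pvStepA (st : List String × Option String) (segment : List (String × String)) :
    List String × Option String :=
  match segment.find? (fun p => p.1 == "text") with
  | none => st                                   -- "text" not in segment
  | some p =>
    if p.2 = "" then st                          -- not segment["text"]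
    else
      let speaker := pvGet segment "speaker" "Unknown"
      let start_timestamp := pvGet segment "start_timestamp" "00:00"
      let text := p.2
      let st1 := if some speaker ≠ st.2
        then (st.1 ++ ["\n[" ++ start_timestamp ++ "] " ++ speaker ++ ":"], some speaker)
        else st
      (st1.1 ++ ["    " ++ text], st1.2)

def format_transcript_as_script_py (transcript : List (List (String × String))) : String :=
  PySem.Str.join "\n" (transcript.foldl pvStepA ([], none)).1

-- ===== PORT B =====
def pvSpeaker (s : List (String × String)) : String := pvGet s "speaker" "Unknown"
def pvLine (s : List (String × String)) : String := "    " ++ pvGet s "text" ""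
def pvHeader (s : List (String × String)) : String :=
  "\n[" ++ pvGet s "start_timestamp" "00:00" ++ "] " ++ pvSpeaker s ++ ":"

-- emit the lines run by run (the while-loop over consecutive same-speaker runs in Source B)
def pvEmitRuns : List (List (String × String)) → List String
  | [] => []
  | first :: rest =>
    let sp := pvSpeaker first
    let run := rest.takeWhile (fun s => pvSpeaker s == sp)
    let tail := rest.dropWhile (fun s => pvSpeaker s == sp)
    pvHeader first :: ((first :: run).map pvLine ++ pvEmitRuns tail)
termination_by l => l.length
decreasing_by
  have := List.length_dropWhile_le (p := fun s => pvSpeaker s == pvSpeaker first) (l := rest)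
  simp; omega

def format_transcript_as_script_py_alt (transcript : List (List (String × String))) : String :=
  PySem.Str.join "\n" (pvEmitRuns (transcript.filter (fun s => pvGet s "text" "" != "")))

-- ===== PRECONDITION & SPEC =====
def Spec_format_transcript_as_script_py (transcript : List (List (String × String))) (out : String) : Prop := out = format_transcript_as_script_py_alt transcript
instance (transcript : List (List (String × String))) (out : String) : Decidable (Spec_format_transcript_as_script_py transcript out) := by unfold Spec_format_transcript_as_script_py; infer_instance

-- ===== CLAIM (what is proved, stated in full; the proofs are below) =====
def Claim_equal_format_transcript_as_script_py : Prop := ∀ (transcript : List (List (String × String))), Dom_format_transcript_as_script_py transcript → Spec_format_transcript_as_script_py transcript (format_transcript_as_script_py transcript)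

-- ===== LEMMAS AND PROOFS =====

-- A's loop body restricted to the non-skipped segments (text present and non-empty)
def pvStepB (st : List String × Option String) (segment : List (String × String)) :
    List String × Option String :=
  let sp := pvSpeaker segment
  let st1 := if some sp ≠ st.2 then (st.1 ++ [pvHeader segment], some sp) else st
  (st1.1 ++ [pvLine segment], st1.2)

-- A's emission as a recursion carrying the current speaker
def pvEmitC : Option String → List (List (String × String)) → List String
  | _, [] => []
  | cur, s :: rest =>
    if some (pvSpeaker s) = cur then pvLine s :: pvEmitC cur rest
    else pvHeader s :: pvLine s :: pvEmitC (some (pvSpeaker s)) rest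

lemma pvStepA_skip (st : List String × Option String) (seg : List (String × String))
    (h : pvGet seg "text" "" = "") : pvStepA st seg = st := by
  unfold pvStepA
  unfold pvGet at h
  cases hf : seg.find? (fun p => p.1 == "text") with
  | none => rfl
  | some p => simp [hf] at h ⊢; simp [h]

lemma pvStepA_proc (st : List String × Option String) (seg : List (String × String))
    (h : pvGet seg "text" "" ≠ "") : pvStepA st seg = pvStepB st seg := by
  unfold pvStepA pvStepB pvLine
  unfold pvGet at h ⊢
  cases hf : seg.find? (fun p => p.1 == "text") with
  | none => simp [hf] at h
  | some p =>
    simp [hf] at h ⊢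
    simp [h, pvHeader, pvSpeaker, pvGet]

lemma pvFoldA_filter (l : List (List (String × String))) (st : List String × Option String) :
    l.foldl pvStepA st = (l.filter (fun s => pvGet s "text" "" != "")).foldl pvStepB st := by
  induction l generalizing st with
  | nil => rfl
  | cons x xs ih =>
    by_cases h : pvGet x "text" "" = ""
    · simp [h, pvStepA_skip st x h, ih]
    · simp [h, pvStepA_proc st x h, ih]

lemma pvFoldB_emitC (l : List (List (String × String))) (acc : List String) (cur : Option String) :
    (l.foldl pvStepB (acc, cur)).1 = acc ++ pvEmitC cur l := by
  induction l generalizing acc cur with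
  | nil => simp [pvEmitC]
  | cons x xs ih =>
    by_cases h : some (pvSpeaker x) = cur
    · simp [List.foldl_cons, pvStepB, h, pvEmitC, ih]
    · simp [List.foldl_cons, pvStepB, h, pvEmitC, ih]

lemma pvEmitC_some (l : List (List (String × String))) (sp : String) :
    pvEmitC (some sp) l =
      (l.takeWhile (fun s => pvSpeaker s == sp)).map pvLine
        ++ pvEmitRuns (l.dropWhile (fun s => pvSpeaker s == sp)) := by
  induction l generalizing sp with
  | nil => simp [pvEmitC, pvEmitRuns]
  | cons x xs ih =>
    by_cases h : pvSpeaker x = sp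
    · simp [pvEmitC, h, ih]
    · simp [pvEmitC, h, pvEmitRuns, ih]

lemma pvEmitC_none (l : List (List (String × String))) : pvEmitC none l = pvEmitRuns l := by
  cases l with
  | nil => simp [pvEmitC, pvEmitRuns]
  | cons x xs =>
    simp [pvEmitC, pvEmitRuns, pvEmitC_some]

-- ===== VERDICT (by name: the statement is the Claim_ definition above) =====
theorem format_transcript_as_script_py_spec : Claim_equal_format_transcript_as_script_py := by
  intro transcript _
  unfold Spec_format_transcript_as_script_py
  unfold format_transcript_as_script_py format_transcript_as_script_py_alt
  rw [pvFoldA_filter, pvFoldB_emitC, pvEmitC_none]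
  simp
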